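-- pv_equiv track=rewrite | github.com/Ferdin-Arsenic/Praktikum_Dasar_Pemrograman_2024 | Python/pola_prima.py | buat_persegi
-- ===== SOURCE A (Python) =====
-- def buat_persegi(N, prima):
--     persegi = [[''] * N for i in range(N)]
--     diagonal_index = 0
--     for i in range(N):
--         for j in range(N):
--             if i == j:
--                 persegi[i][j] = str(prima[diagonal_index])
--             elif i > j:
--                 persegi[i][j] = str(prima[i - j])
--             else:
--                 persegi[i][j] = str(prima[j - i])
--     return persegi
-- ===== SOURCE B (Python) =====
-- def buat_persegi(N, prima):
--     s = [str(prima[k]) for k in range(N)]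
--     return [s[1:i + 1][::-1] + s[:N - i] for i in range(N)]
-- ===== Notes on version B (the rewrite author's own statement) =====
-- stated objective: simpler
-- what changed: Replaces the N×N nested index loops over a mutable grid (with a per-cell i==j / i>j / i<j branch) by precomputing the 1-D string table once and building each row of the symmetric Toeplitz grid as a reversed prefix slice plus a forward prefix slice.
import Mathlib
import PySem

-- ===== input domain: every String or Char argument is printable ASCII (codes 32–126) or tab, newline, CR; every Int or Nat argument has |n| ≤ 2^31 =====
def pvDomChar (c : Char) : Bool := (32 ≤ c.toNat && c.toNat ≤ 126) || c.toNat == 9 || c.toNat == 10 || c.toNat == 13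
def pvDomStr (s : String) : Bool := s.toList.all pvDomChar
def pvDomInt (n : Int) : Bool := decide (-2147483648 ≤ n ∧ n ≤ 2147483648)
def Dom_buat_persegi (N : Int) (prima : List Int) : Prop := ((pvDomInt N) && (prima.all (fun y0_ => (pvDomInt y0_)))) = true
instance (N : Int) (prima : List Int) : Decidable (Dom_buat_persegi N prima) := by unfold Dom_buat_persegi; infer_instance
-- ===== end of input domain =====

-- B replaces the nested per-cell index loops of A by a 1-D string table and per-row
-- slice concatenation (reversed prefix + forward prefix); objective: simpler.

-- ===== PORT A =====
def buat_persegi (N : Int) (prima : List Int) : List (List String) :=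
  let persegi := (PySem.List.pyRange 0 N 1).map (fun _ => List.replicate N.toNat "")
  let diagonal_index : Int := 0
  (PySem.List.pyRange 0 N 1).foldl (fun persegi i =>
    (PySem.List.pyRange 0 N 1).foldl (fun persegi j =>
      PySem.List.pySetD persegi i (PySem.List.pySetD (PySem.List.pyGetD persegi i []) j
        (if i = j then PySem.Int.toStr (PySem.List.pyGetD prima diagonal_index 0)
         else if i > j then PySem.Int.toStr (PySem.List.pyGetD prima (i - j) 0)
         else PySem.Int.toStr (PySem.List.pyGetD prima (j - i) 0)))) persegi) persegi

-- ===== PORT B =====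
def buat_persegi_alt (N : Int) (prima : List Int) : List (List String) :=
  let s := (PySem.List.pyRange 0 N 1).map (fun k => PySem.Int.toStr (PySem.List.pyGetD prima k 0))
  (PySem.List.pyRange 0 N 1).map (fun i =>
    ((PySem.List.slice? (PySem.List.slice s (some 1) (some (i + 1))) none none (-1)).getD [])
      ++ PySem.List.slice s none (some (N - i)))

-- ===== PRECONDITION & SPEC =====
-- Pre_ excludes exactly the inputs where Python A raises IndexError: 0 < N but prima is
-- shorter than N (every |i-j| index 0..N-1 is read).
def Pre_buat_persegi (N : Int) (prima : List Int) : Prop := 0 < N → N ≤ (prima.length : Int)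
instance (N : Int) (prima : List Int) : Decidable (Pre_buat_persegi N prima) := by unfold Pre_buat_persegi; infer_instance
def pvWitness_buat_persegi : Int × List Int := (3, [2, 3, 5])

def Spec_buat_persegi (N : Int) (prima : List Int) (out : List (List String)) : Prop := out = buat_persegi_alt N prima
instance (N : Int) (prima : List Int) (out : List (List String)) : Decidable (Spec_buat_persegi N prima out) := by unfold Spec_buat_persegi; infer_instance

-- ===== CLAIM (what is proved, stated in full; the proofs are below) =====
def Claim_equal_buat_persegi : Prop := ∀ (N : Int) (prima : List Int), Dom_buat_persegi N prima → Pre_buat_persegi N prima → Spec_buat_persegi N prima (buat_persegi N prima)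

-- ===== LEMMAS AND PROOFS =====

-- the cell value both programs compute, as a function of Nat indices
def pvVal (prima : List Int) (k : Nat) : String := PySem.Int.toStr (PySem.List.pyGetD prima (k : Int) 0)

def pvEnt (prima : List Int) (i j : Nat) : String :=
  if j ≤ i then pvVal prima (i - j) else pvVal prima (j - i)

def pvTarget (N : Int) (prima : List Int) : List (List String) :=
  (List.range N.toNat).map (fun i => (List.range N.toNat).map (fun j => pvEnt prima i j))

-- setting every index 0..n-1 of a list of length ≥ n yields the map plus the untouched tail
theorem pv_set_fold {α : Type} (f : Nat → α) :
    ∀ (n : Nat) (xs : List α), n ≤ xs.length →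
      (List.range n).foldl (fun row j => row.set j (f j)) xs = (List.range n).map f ++ xs.drop n := by
  intro n
  induction n with
  | zero => intro xs _; simp
  | succ m ih =>
    intro xs h
    rw [List.range_succ, List.foldl_append, ih xs (by omega)]
    simp only [List.foldl_cons, List.foldl_nil]
    have hlen : ((List.range m).map f).length = m := by simp
    rw [List.set_append_right _ _ (by omega)]
    have hd : xs.drop m = xs[m] :: xs.drop (m + 1) := List.drop_eq_getElem_cons (by omega)
    rw [hlen]
    simp only [Nat.sub_self]
    rw [hd, List.set_cons_zero]
    simp

-- the inner j-loop only rewrites row i of the grid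
theorem pv_inner_fold (js : List Nat) (f : Nat → String) :
    ∀ (g : List (List String)) (i : Nat), i < g.length →
      js.foldl (fun h j => h.set i ((h.getD i []).set j (f j))) g
        = g.set i (js.foldl (fun row j => row.set j (f j)) (g.getD i [])) := by
  induction js with
  | nil => intro g i h; simp [List.getElem?_eq_getElem h]
  | cons j js ih =>
    intro g i h
    simp only [List.foldl_cons]
    rw [ih _ i (by simpa using h)]
    rw [List.set_set]
    congr 1
    rw [List.getD_eq_getElem _ _ (by simpa using h), List.getElem_set_self,
        List.getD_eq_getElem _ _ h]

-- the whole nested loop of A, Nat-indexed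
theorem pv_outer (n : Nat) (w : Nat → Nat → String) :
    ∀ (m : Nat), m ≤ n →
      (List.range m).foldl
          (fun g i => (List.range n).foldl (fun h j => h.set i ((h.getD i []).set j (w i j))) g)
          ((List.range n).map (fun _ => List.replicate n ""))
        = (List.range m).map (fun i => (List.range n).map (w i))
            ++ ((List.range n).map (fun _ => (List.replicate n "" : List String))).drop m := by
  intro m
  induction m with
  | zero => intro _; simp
  | succ m ih =>
    intro hm
    set g0 : List (List String) := (List.range n).map (fun _ => List.replicate n "") with hg0
    have hg0len : g0.length = n := by simp [hg0]
    rw [List.range_succ, List.foldl_append, ih (by omega)]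
    simp only [List.foldl_cons, List.foldl_nil]
    set A := (List.range m).map (fun i => (List.range n).map (w i)) with hA
    have hAlen : A.length = m := by simp [hA]
    have hG : (A ++ g0.drop m).length = n := by simp [hAlen, hg0len]; omega
    rw [pv_inner_fold _ _ _ m (by omega)]
    have hdm : g0.drop m = (List.replicate n "") :: g0.drop (m + 1) := by
      rw [List.drop_eq_getElem_cons (by omega)]
      simp [hg0]
    have hget : (A ++ g0.drop m).getD m [] = List.replicate n "" := by
      rw [List.getD_eq_getElem?_getD, List.getElem?_append_right (by omega), hAlen]
      simp [hdm]
    rw [hget, pv_set_fold (w m) n (List.replicate n "") (by simp)]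
    rw [List.set_append_right _ _ (by omega), hAlen, Nat.sub_self, hdm, List.set_cons_zero]
    simp [hA]

-- the branch A computes per cell equals pvEnt
theorem pv_cell (prima : List Int) (i j : Nat) :
    (if (i : Int) = (j : Int) then PySem.Int.toStr (PySem.List.pyGetD prima 0 0)
     else if (i : Int) > (j : Int) then PySem.Int.toStr (PySem.List.pyGetD prima ((i : Int) - (j : Int)) 0)
     else PySem.Int.toStr (PySem.List.pyGetD prima ((j : Int) - (i : Int)) 0))
      = pvEnt prima i j := by
  unfold pvEnt pvVal
  split_ifs with h1 h2 h3 h4 h5 <;> (congr 2; omega)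

theorem pv_A_eq (N : Int) (prima : List Int) : buat_persegi N prima = pvTarget N prima := by
  unfold buat_persegi pvTarget
  by_cases hN : N ≤ 0
  · rw [PySem.List.pyRange_one_eq_nil (by omega)]
    have h0 : N.toNat = 0 := by omega
    simp [h0]
  · simp only [PySem.List.pyRange_one]
    simp only [Int.sub_zero, zero_add, List.map_map, Function.comp_def, List.foldl_map]
    simp only [PySem.List.pySetD_natCast, PySem.List.pyGetD_natCast]
    simp only [pv_cell]
    rw [pv_outer N.toNat (fun i j => pvEnt prima i j) N.toNat (le_refl _)]
    simp

theorem pv_rowB (prima : List Int) (n i : Nat) (hi : i < n) :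
    (((((List.range n).map (pvVal prima)).drop 1).take i).reverse)
        ++ ((List.range n).map (pvVal prima)).take (n - i)
      = (List.range n).map (fun j => pvEnt prima i j) := by
  apply List.ext_getElem
  · simp; omega
  · intro j hj1 hj2
    have hj : j < n := by simpa using hj2
    by_cases hji : j < i
    · rw [List.getElem_append_left (by simp; omega), List.getElem_reverse]
      simp only [List.getElem_take, List.getElem_drop, List.getElem_map, List.getElem_range,
                 List.length_take, List.length_drop, List.length_map, List.length_range, pvEnt]
      rw [if_pos (by omega)]
      congr 1
      omega
    · rw [List.getElem_append_right (by simp; omega)]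
      simp only [List.getElem_take, List.getElem_map, List.getElem_range,
                 List.length_reverse, List.length_take, List.length_drop, List.length_map,
                 List.length_range, pvEnt]
      by_cases hij : j = i
      · subst hij
        rw [if_pos (le_refl _)]
        congr 1
        omega
      · rw [if_neg (by omega)]
        congr 1
        omega

theorem pv_B_eq (N : Int) (prima : List Int) : buat_persegi_alt N prima = pvTarget N prima := by
  unfold buat_persegi_alt pvTarget
  by_cases hN : N ≤ 0
  · rw [PySem.List.pyRange_one_eq_nil (by omega)]
    have h0 : N.toNat = 0 := by omega
    simp [h0]
  · simp only [PySem.List.pyRange_one]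
    simp only [Int.sub_zero, zero_add, List.map_map, Function.comp_def]
    apply List.map_congr_left
    intro i hi
    have hiN : i < N.toNat := by simpa using hi
    rw [PySem.List.slice?_none_none_neg_one]
    simp only [Option.getD_some]
    set s := List.map (fun x => PySem.Int.toStr (PySem.List.pyGetD prima ((x : Nat) : Int) 0)) (List.range N.toNat) with hs
    have h1 : PySem.List.slice s (some 1) (some ((i : Int) + 1)) = (s.drop 1).take i := by
      rw [PySem.List.slice_toNat s (a := 1) (b := (i : Int) + 1) (by omega) (by omega)]
      congr 1
    have h2 : PySem.List.slice s none (some (N - (i : Int))) = s.take (N.toNat - i) := by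
      rw [PySem.List.slice_to s (b := N - (i : Int)) (by omega)]
      congr 1
      omega
    rw [h1, h2]
    exact pv_rowB prima N.toNat i hiN

-- ===== VERDICT (by name: the statement is the Claim_ definition above) =====
theorem buat_persegi_spec : Claim_equal_buat_persegi := by
  intro N prima _ _
  unfold Spec_buat_persegi
  rw [pv_A_eq, pv_B_eq]
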